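-- pv_equiv track=rewrite | github.com/I1am1your1father1/Graduation-Project | mis_comparison/tabu.py | greedy_mis_min_degree_naive
-- ===== SOURCE A (Python) =====
-- def greedy_mis_min_degree_naive(adj):
--     """
--     朴素最小度贪心 MIS，作为 tabu 的一种初始解
--     """
--     n = len(adj)
--     alive = set(range(n))
--     in_set = [False] * n
--
--     while alive:
--         best_u = None
--         best_deg = None
--
--         for u in sorted(alive):
--             deg_u = sum((v in alive) for v in adj[u])
--             if best_deg is None or deg_u < best_deg:
--                 best_deg = deg_u
--                 best_u = u
--
--         in_set[best_u] = True
--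
--         to_remove = {best_u}
--         for v in adj[best_u]:
--             if v in alive:
--                 to_remove.add(v)
--
--         alive -= to_remove
--
--     return in_set
-- ===== SOURCE B (Python) =====
-- def greedy_mis_min_degree_naive(adj):
--     """
--     Same greedy min-degree MIS, but with incrementally maintained alive-degrees
--     (via a reverse-occurrence index) instead of recomputing every degree each round.
--     """
--     n = len(adj)
--     alive = [True] * n
--     in_set = [False] * n
--     deg = [0] * n
--     rev = [[] for _ in range(n)]
--     for u in range(n):
--         for v in adj[u]:
--             if 0 <= v < n:
--                 deg[u] += 1
--                 rev[v].append(u)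
--     remaining = n
--     while remaining:
--         best_u = None
--         for u in range(n):
--             if alive[u] and (best_u is None or deg[u] < deg[best_u]):
--                 best_u = u
--         in_set[best_u] = True
--         alive[best_u] = False
--         removed = [best_u]
--         for v in adj[best_u]:
--             if 0 <= v < n and alive[v]:
--                 alive[v] = False
--                 removed.append(v)
--         remaining -= len(removed)
--         for w in removed:
--             for x in rev[w]:
--                 if alive[x]:
--                     deg[x] -= 1
--     return in_set
-- ===== Notes on version B (the rewrite author's own statement) =====
-- stated objective: faster
-- what changed: Instead of recomputing every alive vertex's degree from scratch each round, B builds a reverse-occurrence index once and maintains all alive-degrees incrementally, decrementing them as vertices are removed.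
import Mathlib
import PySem

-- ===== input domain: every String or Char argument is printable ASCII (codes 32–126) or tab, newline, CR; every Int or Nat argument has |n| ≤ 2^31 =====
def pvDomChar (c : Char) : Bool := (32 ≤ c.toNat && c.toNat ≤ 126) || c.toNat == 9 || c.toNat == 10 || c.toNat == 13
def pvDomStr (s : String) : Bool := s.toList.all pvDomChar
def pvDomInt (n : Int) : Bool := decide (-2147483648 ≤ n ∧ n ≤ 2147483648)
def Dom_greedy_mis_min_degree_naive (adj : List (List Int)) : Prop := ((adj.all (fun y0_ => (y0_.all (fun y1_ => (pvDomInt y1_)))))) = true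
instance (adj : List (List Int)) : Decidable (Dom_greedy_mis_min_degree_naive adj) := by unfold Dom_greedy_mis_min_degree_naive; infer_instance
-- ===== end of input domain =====

-- B replaces A's per-round recomputation of every alive vertex's degree by a reverse-occurrence
-- index built once plus incrementally maintained degrees (objective: faster, asymptotically).
-- ===== PORT A =====
-- adj[u]: u is always a member of alive ⊆ range(n), so the IndexError default [] is unreachable
def pvA_deg (adj : List (List Int)) (alive : PySem.Set Int) (u : Int) : Int :=
  ((PySem.List.pyGetD adj u []).countP (fun v => PySem.Set.contains alive v) : Int)

def pvA_step (adj : List (List Int)) (alive : PySem.Set Int)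
    (best : Option Int × Option Int) (u : Int) : Option Int × Option Int :=
  let deg_u := pvA_deg adj alive u
  match best.2 with
  | none => (some u, some deg_u)
  | some bd => if deg_u < bd then (some u, some deg_u) else best

def pvA_loop (adj : List (List Int)) : Nat → PySem.Set Int → List Bool → List Bool
  | 0, _, in_set => in_set
  | fuel+1, alive, in_set =>
    if alive = [] then in_set else
      match ((PySem.List.sorted alive (fun x => x) false).foldl (pvA_step adj alive) (none, none)).1 with
      | none => in_set
      | some bu =>
        let in_set' := PySem.List.pySetD in_set bu true
        let to_remove := (PySem.List.pyGetD adj bu []).foldl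
            (fun s v => if PySem.Set.contains alive v then PySem.Set.add s v else s)
            (PySem.Set.ofList [bu])
        pvA_loop adj fuel (PySem.Set.diff alive to_remove) in_set'

def greedy_mis_min_degree_naive (adj : List (List Int)) : List Bool :=
  pvA_loop adj (adj.length + 1)
    (PySem.Set.ofList (PySem.List.pyRange 0 (adj.length : Int) 1))
    (List.replicate adj.length false)

-- ===== PORT B =====
def pvB_build (adj : List (List Int)) : List Int × List (List Nat) :=
  (List.range adj.length).foldl
    (fun st u =>
      (adj.getD u []).foldl
        (fun (st : List Int × List (List Nat)) v =>
          if 0 ≤ v ∧ v < (adj.length : Int) then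
            (st.1.set u (st.1.getD u 0 + 1), st.2.set v.toNat (st.2.getD v.toNat [] ++ [u]))
          else st)
        st)
    (List.replicate adj.length 0, List.replicate adj.length [])

def pvB_sel (alive : List Bool) (deg : List Int) (n : Nat) : Option Nat :=
  (List.range n).foldl
    (fun best u =>
      if alive.getD u false &&
          (match best with
           | none => true
           | some b => decide (deg.getD u 0 < deg.getD b 0)) then some u
      else best)
    none

def pvB_remove (adj : List (List Int)) (alive : List Bool) (bu : Nat) : List Bool × List Nat :=
  (adj.getD bu []).foldl
    (fun (st : List Bool × List Nat) v =>
      if 0 ≤ v ∧ v < (adj.length : Int) ∧ st.1.getD v.toNat false = true then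
        (st.1.set v.toNat false, st.2 ++ [v.toNat])
      else st)
    (alive.set bu false, [bu])

def pvB_dec (rev : List (List Nat)) (alive : List Bool) (removed : List Nat) (deg : List Int) : List Int :=
  removed.foldl
    (fun deg w =>
      (rev.getD w []).foldl
        (fun deg x => if alive.getD x false = true then deg.set x (deg.getD x 0 - 1) else deg)
        deg)
    deg

def pvB_loop (adj : List (List Int)) (rev : List (List Nat)) :
    Nat → List Bool → List Int → List Bool → Int → List Bool
  | 0, _, _, in_set, _ => in_set
  | fuel+1, alive, deg, in_set, remaining =>
    if remaining = 0 then in_set else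
      match pvB_sel alive deg adj.length with
      | none => in_set
      | some bu =>
        let in_set' := in_set.set bu true
        let p := pvB_remove adj alive bu
        let deg' := pvB_dec rev p.1 p.2 deg
        pvB_loop adj rev fuel p.1 deg' in_set' (remaining - (p.2.length : Int))

def greedy_mis_min_degree_naive_alt (adj : List (List Int)) : List Bool :=
  let st := pvB_build adj
  pvB_loop adj st.2 (adj.length + 1)
    (List.replicate adj.length true) st.1
    (List.replicate adj.length false) (adj.length : Int)


-- ===== PRECONDITION & SPEC =====
def Spec_greedy_mis_min_degree_naive (adj : List (List Int)) (out : List Bool) : Prop := out = greedy_mis_min_degree_naive_alt adj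
instance (adj : List (List Int)) (out : List Bool) : Decidable (Spec_greedy_mis_min_degree_naive adj out) := by unfold Spec_greedy_mis_min_degree_naive; infer_instance

-- ===== CLAIM (what is proved, stated in full; the proofs are below) =====
def Claim_equal_greedy_mis_min_degree_naive : Prop := ∀ (adj : List (List Int)), Dom_greedy_mis_min_degree_naive adj → Spec_greedy_mis_min_degree_naive adj (greedy_mis_min_degree_naive adj)

-- ===== LEMMAS AND PROOFS =====


-- ---------- generic helpers ----------

lemma pv_getD_set {α : Type} (l : List α) (i j : Nat) (a d : α) :
    (l.set i a).getD j d = if j = i ∧ i < l.length then a else l.getD j d := by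
  simp only [List.getD_eq_getElem?_getD, List.getElem?_set]
  split_ifs <;> simp_all

lemma pv_countP_add {α : Type} (l : List α) (p q : α → Bool)
    (h : ∀ x ∈ l, q x = true → p x = true) :
    l.countP (fun x => p x && !q x) + l.countP q = l.countP p := by
  induction l with
  | nil => simp
  | cons a t ih =>
    have ha := h a (by simp)
    have ht : ∀ x ∈ t, q x = true → p x = true := fun x hx => h x (by simp [hx])
    have := ih ht
    simp only [List.countP_cons]
    cases hq : q a <;> cases hp : p a <;> simp_all <;> omega

lemma pv_countP_or {α : Type} (l : List α) (p q : α → Bool)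
    (h : ∀ x ∈ l, ¬(p x = true ∧ q x = true)) :
    l.countP (fun x => p x || q x) = l.countP p + l.countP q := by
  induction l with
  | nil => simp
  | cons a t ih =>
    have ha := h a (by simp)
    have ht : ∀ x ∈ t, ¬(p x = true ∧ q x = true) := fun x hx => h x (by simp [hx])
    have := ih ht
    simp only [List.countP_cons]
    cases hq : q a <;> cases hp : p a <;> simp_all <;> omega

lemma pv_count_nodup_range (R : List Nat) (n : Nat) (hnd : R.Nodup) (hb : ∀ x ∈ R, x < n) :
    (List.range n).countP (fun u => decide (u ∈ R)) = R.length := by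
  rw [List.countP_eq_length_filter]
  have hperm : ((List.range n).filter (fun u => decide (u ∈ R))).Perm R := by
    rw [List.perm_ext_iff_of_nodup (List.Nodup.filter _ List.nodup_range) hnd]
    intro a
    simp only [List.mem_filter, List.mem_range, decide_eq_true_eq]
    exact ⟨fun h => h.2, fun h => ⟨hb a h, h⟩⟩
  exact hperm.length_eq

lemma pv_sum_count (l : List Int) : ∀ (R : List Nat), R.Nodup →
    (R.map (fun (w : Nat) => ((l.count ((w : Int))) : Int))).sum
      = ((l.countP (fun v => decide (∃ w ∈ R, v = (w : Int)))) : Int) := by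
  intro R
  induction R with
  | nil => simp
  | cons a t ih =>
    intro hnd
    have hat : a ∉ t := (List.nodup_cons.mp hnd).1
    have ht := ih (List.nodup_cons.mp hnd).2
    simp only [List.map_cons, List.sum_cons]
    have hsplit : l.countP (fun v => decide (∃ w ∈ a :: t, v = (w : Int)))
        = l.countP (fun v => decide (v = (a : Int)) || decide (∃ w ∈ t, v = (w : Int))) := by
      apply List.countP_congr
      intro x _
      simp only [List.mem_cons, decide_eq_true_eq, Bool.or_eq_true]
      constructor
      · rintro ⟨w, hw | hw, rfl⟩
        · left; simp [hw]
        · right; exact ⟨w, hw, rfl⟩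
      · rintro (h | ⟨w, hw, rfl⟩)
        · exact ⟨a, Or.inl rfl, h⟩
        · exact ⟨w, Or.inr hw, rfl⟩
    have hdisj : ∀ x ∈ l, ¬((decide (x = (a : Int)) = true) ∧ (decide (∃ w ∈ t, x = (w : Int)) = true)) := by
      intro x _
      simp only [decide_eq_true_eq]
      rintro ⟨rfl, w, hw, hww⟩
      have : w = a := by exact_mod_cast hww.symm
      exact hat (this ▸ hw)
    rw [hsplit, pv_countP_or l _ _ hdisj, ht]
    have hcount : l.count ((a : Int)) = l.countP (fun v => decide (v = (a : Int))) := by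
      rw [List.count_eq_countP]
      apply List.countP_congr
      intro x _
      cases hbe : (x == ((a : Int))) <;> cases hde : decide (x = ((a : Int))) <;> simp_all
    rw [hcount]
    push_cast
    ring

-- ---------- selection ----------

lemma pv_sel_rel (adj : List (List Int)) (aliveA : PySem.Set Int) (aliveB : List Bool) (deg : List Int)
    (hdeg : ∀ u : Nat, u < adj.length → aliveB.getD u false = true →
        deg.getD u 0 = ((adj.getD u []).countP (fun v => aliveA.contains v) : Int)) :
    ∀ (l : List Nat), (∀ u ∈ l, u < adj.length) →
    ∀ (bA : Option Int × Option Int) (bB : Option Nat),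
      ((bA = (none, none) ∧ bB = none) ∨
        (∃ b : Nat, bB = some b ∧ b < adj.length ∧ aliveB.getD b false = true ∧
          bA = (some ((b : Int)), some (deg.getD b 0)))) →
      (let rA := List.foldl (pvA_step adj aliveA) bA
          ((l.filter (fun u => aliveB.getD u false)).map (fun (u : Nat) => ((u : Int))));
       let rB := List.foldl (fun best u =>
          if aliveB.getD u false &&
              (match best with
               | none => true
               | some b => decide (deg.getD u 0 < deg.getD b 0)) then some u
          else best) bB l;
       (rA = (none, none) ∧ rB = none) ∨
        (∃ b : Nat, rB = some b ∧ b < adj.length ∧ aliveB.getD b false = true ∧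
          rA = (some ((b : Int)), some (deg.getD b 0)))) := by
  intro l
  induction l with
  | nil => intro _ bA bB h; exact h
  | cons u t ih =>
    intro hlt bA bB h
    have hu : u < adj.length := hlt u (by simp)
    have ht : ∀ x ∈ t, x < adj.length := fun x hx => hlt x (by simp [hx])
    by_cases ha : aliveB.getD u false = true
    · have hdu : pvA_deg adj aliveA ((u : Int)) = deg.getD u 0 := by
        rw [hdeg u hu ha]
        simp [pvA_deg, PySem.List.pyGetD_natCast]
      have hfilter : List.filter (fun u => aliveB.getD u false) (u :: t)
          = u :: List.filter (fun u => aliveB.getD u false) t := List.filter_cons_of_pos ha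
      rw [hfilter]
      simp only [List.map_cons, List.foldl_cons]
      rcases h with ⟨hA, hB⟩ | ⟨b, hB, hbn, hba, hA⟩
      · subst hA; subst hB
        have hstepA : pvA_step adj aliveA (none, none) ((u : Int))
            = (some ((u : Int)), some (deg.getD u 0)) := by
          simp [pvA_step, hdu]
        rw [hstepA]
        have hstepB : (if aliveB.getD u false &&
            (match (none : Option Nat) with
             | none => true
             | some b => decide (deg.getD u 0 < deg.getD b 0)) then some u
          else (none : Option Nat)) = some u := by rw [ha]; simp
        rw [hstepB]
        exact ih ht _ _ (Or.inr ⟨u, rfl, hu, ha, rfl⟩)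
      · subst hA; subst hB
        by_cases hcmp : deg.getD u 0 < deg.getD b 0
        · have hstepA : pvA_step adj aliveA (some ((b : Int)), some (deg.getD b 0)) ((u : Int))
              = (some ((u : Int)), some (deg.getD u 0)) := by
            simp only [pvA_step, hdu]
            rw [if_pos hcmp]
          rw [hstepA]
          have hstepB : (if aliveB.getD u false &&
              (match (some b : Option Nat) with
               | none => true
               | some b => decide (deg.getD u 0 < deg.getD b 0)) then some u
            else (some b : Option Nat)) = some u := by
            show (if aliveB.getD u false && decide (deg.getD u 0 < deg.getD b 0) then some u
              else (some b : Option Nat)) = some u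
            rw [ha, decide_eq_true hcmp]
            simp
          rw [hstepB]
          exact ih ht _ _ (Or.inr ⟨u, rfl, hu, ha, rfl⟩)
        · have hstepA : pvA_step adj aliveA (some ((b : Int)), some (deg.getD b 0)) ((u : Int))
              = (some ((b : Int)), some (deg.getD b 0)) := by
            simp only [pvA_step, hdu]
            rw [if_neg hcmp]
          rw [hstepA]
          have hstepB : (if aliveB.getD u false &&
              (match (some b : Option Nat) with
               | none => true
               | some b => decide (deg.getD u 0 < deg.getD b 0)) then some u
            else (some b : Option Nat)) = some b := by
            show (if aliveB.getD u false && decide (deg.getD u 0 < deg.getD b 0) then some u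
              else (some b : Option Nat)) = some b
            rw [decide_eq_false hcmp]
            simp
          rw [hstepB]
          exact ih ht _ _ (Or.inr ⟨b, rfl, hbn, hba, rfl⟩)
    · have ha' : aliveB.getD u false = false := by simpa using ha
      have hfilter : List.filter (fun u => aliveB.getD u false) (u :: t)
          = List.filter (fun u => aliveB.getD u false) t := List.filter_cons_of_neg (by simp only [ha']; simp)
      rw [hfilter]
      simp only [List.foldl_cons]
      have hstepB : ∀ bB : Option Nat, (if aliveB.getD u false &&
          (match bB with
           | none => true
           | some b => decide (deg.getD u 0 < deg.getD b 0)) then some u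
        else bB) = bB := by intro bB; rw [ha']; simp
      rw [hstepB]
      exact ih ht _ _ h

lemma pv_selB_isSome (aliveB : List Bool) (deg : List Int) :
    ∀ (l : List Nat) (b : Nat),
      (List.foldl (fun best u =>
          if aliveB.getD u false &&
              (match best with
               | none => true
               | some b => decide (deg.getD u 0 < deg.getD b 0)) then some u
          else best) (some b) l) ≠ none := by
  intro l
  induction l with
  | nil => intro b; simp
  | cons u t ih =>
    intro b
    simp only [List.foldl_cons]
    by_cases hc : (aliveB.getD u false &&
        (match (some b : Option Nat) with
         | none => true
         | some b => decide (deg.getD u 0 < deg.getD b 0))) = true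
    · rw [if_pos hc]; exact ih u
    · rw [if_neg hc]; exact ih b

lemma pv_selB_ne_none (aliveB : List Bool) (deg : List Int) :
    ∀ (l : List Nat), (∃ u ∈ l, aliveB.getD u false = true) →
      (List.foldl (fun best u =>
          if aliveB.getD u false &&
              (match best with
               | none => true
               | some b => decide (deg.getD u 0 < deg.getD b 0)) then some u
          else best) none l) ≠ none := by
  intro l
  induction l with
  | nil => rintro ⟨u, hu, _⟩; simp at hu
  | cons u t ih =>
    rintro ⟨x, hx, hax⟩
    simp only [List.foldl_cons]
    by_cases ha : aliveB.getD u false = true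
    · have hstepB : (if aliveB.getD u false &&
          (match (none : Option Nat) with
           | none => true
           | some b => decide (deg.getD u 0 < deg.getD b 0)) then some u
        else (none : Option Nat)) = some u := by rw [ha]; simp
      rw [hstepB]
      exact pv_selB_isSome aliveB deg t u
    · have ha' : aliveB.getD u false = false := by simpa using ha
      have hstepB : (if aliveB.getD u false &&
          (match (none : Option Nat) with
           | none => true
           | some b => decide (deg.getD u 0 < deg.getD b 0)) then some u
        else (none : Option Nat)) = none := by rw [ha']; simp
      rw [hstepB]
      rcases List.mem_cons.mp hx with rfl | hxt
      · exact absurd hax ha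
      · exact ih ⟨x, hxt, hax⟩

lemma pv_sorted_alive (adj : List (List Int)) (aliveA : PySem.Set Int) (aliveB : List Bool)
    (hnd : aliveA.Nodup)
    (hrng : ∀ x ∈ aliveA, ∃ u : Nat, u < adj.length ∧ x = (u : Int))
    (hmem : ∀ u : Nat, u < adj.length → (aliveB.getD u false = true ↔ (u : Int) ∈ aliveA)) :
    PySem.List.sorted aliveA (fun x => x) false
      = ((List.range adj.length).filter (fun u => aliveB.getD u false)).map (fun (u : Nat) => ((u : Int))) := by
  apply PySem.List.sorted_eq_of_perm_of_pairwise_lt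
  · rw [List.perm_ext_iff_of_nodup
      (List.Nodup.map (fun a b hab => by simpa using hab : Function.Injective (fun (u : Nat) => ((u : Int))))
        (List.Nodup.filter _ List.nodup_range)) hnd]
    intro a
    simp only [List.mem_map, List.mem_filter, List.mem_range]
    constructor
    · rintro ⟨u, ⟨hun, hau⟩, rfl⟩
      exact (hmem u hun).mp hau
    · intro haA
      obtain ⟨u, hun, rfl⟩ := hrng a haA
      exact ⟨u, ⟨hun, (hmem u hun).mpr haA⟩, rfl⟩
  · rw [List.pairwise_map]
    refine ((List.pairwise_lt_range).filter _).imp ?_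
    intro a b h
    exact_mod_cast h

-- ---------- removal ----------

lemma pv_mem_foldl_add_if (p : Int → Bool) :
    ∀ (l : List Int) (s : PySem.Set Int) (y : Int),
      (y ∈ l.foldl (fun s v => if p v then PySem.Set.add s v else s) s) ↔
        y ∈ s ∨ (y ∈ l ∧ p y = true) := by
  intro l
  induction l with
  | nil => simp
  | cons v t ih =>
    intro s y
    simp only [List.foldl_cons]
    cases hp : p v
    · rw [if_neg (by simp [hp])]
      rw [ih]
      simp only [List.mem_cons]
      constructor
      · rintro (h | ⟨h1, h2⟩)
        · exact Or.inl h
        · exact Or.inr ⟨Or.inr h1, h2⟩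
      · rintro (h | ⟨(rfl | h1), h2⟩)
        · exact Or.inl h
        · exact absurd h2 (by simp [hp])
        · exact Or.inr ⟨h1, h2⟩
    · rw [if_pos (by simp [hp])]
      rw [ih]
      simp only [PySem.Set.mem_add, List.mem_cons]
      constructor
      · rintro ((h | rfl) | ⟨h1, h2⟩)
        · exact Or.inl h
        · exact Or.inr ⟨Or.inl rfl, hp⟩
        · exact Or.inr ⟨Or.inr h1, h2⟩
      · rintro (h | ⟨(rfl | h1), h2⟩)
        · exact Or.inl (Or.inl h)
        · exact Or.inl (Or.inr rfl)
        · exact Or.inr ⟨h1, h2⟩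

lemma pv_remove_fold (adj : List (List Int)) (aliveB : List Bool) :
    ∀ (l : List Int) (al : List Bool) (rem : List Nat),
      al.length = adj.length →
      rem.Nodup →
      (∀ x ∈ rem, x < adj.length) →
      (∀ x : Nat, x < adj.length → al.getD x false = (aliveB.getD x false && !(decide (x ∈ rem)))) →
      (let q := l.foldl (fun (st : List Bool × List Nat) v =>
          if 0 ≤ v ∧ v < (adj.length : Int) ∧ st.1.getD v.toNat false = true then
            (st.1.set v.toNat false, st.2 ++ [v.toNat])
          else st) (al, rem);
       q.1.length = adj.length ∧ q.2.Nodup ∧ (∀ x ∈ q.2, x < adj.length) ∧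
       (∀ x : Nat, x ∈ q.2 ↔ (x ∈ rem ∨ ((x : Int) ∈ l ∧ x < adj.length ∧ aliveB.getD x false = true))) ∧
       (∀ x : Nat, x < adj.length → q.1.getD x false = (aliveB.getD x false && !(decide (x ∈ q.2))))) := by
  intro l
  induction l with
  | nil =>
    intro al rem h1 h2 h3 h4
    exact ⟨h1, h2, h3, fun x => by simp, h4⟩
  | cons v t ih =>
    intro al rem h1 h2 h3 h4
    simp only [List.foldl_cons]
    by_cases hc : 0 ≤ v ∧ v < (adj.length : Int) ∧ al.getD v.toNat false = true
    · obtain ⟨hv0, hvn, hval⟩ := hc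
      rw [if_pos ⟨hv0, hvn, hval⟩]
      have hx0n : v.toNat < adj.length := by omega
      have hcast : ((v.toNat : Int)) = v := Int.toNat_of_nonneg hv0
      have halx := h4 v.toNat hx0n
      rw [hval] at halx
      have hsplit : aliveB.getD v.toNat false = true ∧ v.toNat ∉ rem := by
        have := halx.symm
        simpa using this
      have haliveB := hsplit.1
      have hnotrem := hsplit.2
      have h2' : (rem ++ [v.toNat]).Nodup := by
        rw [List.nodup_append_comm]
        exact List.nodup_cons.mpr ⟨hnotrem, h2⟩
      have h3' : ∀ x ∈ rem ++ [v.toNat], x < adj.length := by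
        intro x hx
        rcases List.mem_append.mp hx with hx | hx
        · exact h3 x hx
        · simp at hx; omega
      have h4' : ∀ x : Nat, x < adj.length →
          (al.set v.toNat false).getD x false
            = (aliveB.getD x false && !(decide (x ∈ rem ++ [v.toNat]))) := by
        intro x hxn
        rw [pv_getD_set]
        by_cases hxv : x = v.toNat
        · subst hxv
          rw [if_pos ⟨rfl, by omega⟩]
          simp
        · rw [if_neg (by simp [hxv])]
          rw [h4 x hxn]
          simp [hxv]
      obtain ⟨q1, q2, q3, q4, q5⟩ :=
        ih (al.set v.toNat false) (rem ++ [v.toNat]) (by simp [h1]) h2' h3' h4'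
      refine ⟨q1, q2, q3, ?_, q5⟩
      intro x
      rw [q4 x]
      simp only [List.mem_append, List.mem_cons, List.not_mem_nil, or_false]
      constructor
      · rintro ((hx | rfl) | ⟨hx1, hx2, hx3⟩)
        · exact Or.inl hx
        · exact Or.inr ⟨Or.inl hcast, hx0n, haliveB⟩
        · exact Or.inr ⟨Or.inr hx1, hx2, hx3⟩
      · rintro (hx | ⟨(hx1 | hx1), hx2, hx3⟩)
        · exact Or.inl (Or.inl hx)
        · left; right; omega
        · exact Or.inr ⟨hx1, hx2, hx3⟩
    · rw [if_neg hc]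
      obtain ⟨q1, q2, q3, q4, q5⟩ := ih al rem h1 h2 h3 h4
      refine ⟨q1, q2, q3, ?_, q5⟩
      intro x
      rw [q4 x]
      simp only [List.mem_cons]
      constructor
      · rintro (hx | ⟨hx1, hx2, hx3⟩)
        · exact Or.inl hx
        · exact Or.inr ⟨Or.inr hx1, hx2, hx3⟩
      · rintro (hx | ⟨(hx1 | hx1), hx2, hx3⟩)
        · exact Or.inl hx
        · -- the guard failed but x is in range and alive under aliveB: x must already be in rem
          have hv0 : (0 : Int) ≤ v := by omega
          have hvn : v < (adj.length : Int) := by omega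
          have hne : al.getD v.toNat false ≠ true := fun h => hc ⟨hv0, hvn, h⟩
          have hxv : v.toNat = x := by omega
          rw [hxv, h4 x hx2, hx3] at hne
          left
          by_contra hxr
          simp [hxr] at hne
        · exact Or.inr ⟨hx1, hx2, hx3⟩


-- ---------- degree decrement ----------

lemma pv_dec_inner_len (alive : List Bool) :
    ∀ (ys : List Nat) (deg : List Int),
      (ys.foldl (fun deg x => if alive.getD x false = true then deg.set x (deg.getD x 0 - 1) else deg) deg).length
        = deg.length := by
  intro ys
  induction ys with
  | nil => intro deg; rfl
  | cons y t ih =>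
    intro deg
    simp only [List.foldl_cons]
    by_cases hy : alive.getD y false = true
    · rw [if_pos hy, ih]; simp
    · rw [if_neg hy]; exact ih deg

lemma pv_dec_inner_getD (alive : List Bool) (x : Nat) (hax : alive.getD x false = true) :
    ∀ (ys : List Nat) (deg : List Int), x < deg.length →
      (ys.foldl (fun deg x' => if alive.getD x' false = true then deg.set x' (deg.getD x' 0 - 1) else deg) deg).getD x 0
        = deg.getD x 0 - (ys.count x : Int) := by
  intro ys
  induction ys with
  | nil => intro deg _; simp
  | cons y t ih =>
    intro deg hx
    simp only [List.foldl_cons]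
    by_cases hy : alive.getD y false = true
    · rw [if_pos hy, ih _ (by simpa using hx)]
      rw [pv_getD_set]
      by_cases hxy : x = y
      · subst hxy
        rw [if_pos ⟨rfl, hx⟩, List.count_cons]
        simp only [beq_self_eq_true, if_pos rfl]
        push_cast
        ring
      · rw [if_neg (by simp [hxy]), List.count_cons]
        have : (y == x) = false := by simp [Ne.symm hxy]
        simp [this]
    · rw [if_neg hy, ih _ hx, List.count_cons]
      have hyx : (y == x) = false := by
        simp only [beq_eq_false_iff_ne, ne_eq]
        intro h; exact hy (h ▸ hax)
      simp [hyx]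

lemma pv_dec_len (rev : List (List Nat)) (alive : List Bool) :
    ∀ (removed : List Nat) (deg : List Int), (pvB_dec rev alive removed deg).length = deg.length := by
  intro removed
  induction removed with
  | nil => intro deg; rfl
  | cons w t ih =>
    intro deg
    have hstep : pvB_dec rev alive (w :: t) deg
        = pvB_dec rev alive t ((rev.getD w []).foldl
            (fun deg x => if alive.getD x false = true then deg.set x (deg.getD x 0 - 1) else deg) deg) := rfl
    rw [hstep, ih, pv_dec_inner_len]

lemma pv_dec_getD (rev : List (List Nat)) (alive : List Bool) (x : Nat) (hax : alive.getD x false = true) :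
    ∀ (removed : List Nat) (deg : List Int), x < deg.length →
      (pvB_dec rev alive removed deg).getD x 0
        = deg.getD x 0 - ((removed.map (fun (w : Nat) => (((rev.getD w []).count x) : Int))).sum) := by
  intro removed
  induction removed with
  | nil => intro deg _; simp [pvB_dec]
  | cons w t ih =>
    intro deg hx
    have hstep : pvB_dec rev alive (w :: t) deg
        = pvB_dec rev alive t ((rev.getD w []).foldl
            (fun deg x => if alive.getD x false = true then deg.set x (deg.getD x 0 - 1) else deg) deg) := rfl
    rw [hstep, ih _ (by rw [pv_dec_inner_len]; exact hx)]
    rw [pv_dec_inner_getD alive x hax _ _ hx]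
    simp only [List.map_cons, List.sum_cons]
    ring

-- ---------- the reverse-index build ----------

lemma pv_build_inner (adj : List (List Int)) (u : Nat) (hu : u < adj.length) :
    ∀ (l : List Int) (d : List Int) (r : List (List Nat)),
      d.length = adj.length → r.length = adj.length →
      (let q := l.foldl (fun (st : List Int × List (List Nat)) v =>
          if 0 ≤ v ∧ v < (adj.length : Int) then
            (st.1.set u (st.1.getD u 0 + 1), st.2.set v.toNat (st.2.getD v.toNat [] ++ [u]))
          else st) (d, r);
       q.1.length = adj.length ∧ q.2.length = adj.length ∧
       q.1.getD u 0 = d.getD u 0 + (l.countP (fun v => decide (0 ≤ v ∧ v < (adj.length : Int))) : Int) ∧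
       (∀ w : Nat, w ≠ u → q.1.getD w 0 = d.getD w 0) ∧
       (∀ v : Nat, v < adj.length → ∀ x : Nat,
          (q.2.getD v []).count x = (r.getD v []).count x + (if x = u then l.count ((v : Int)) else 0))) := by
  intro l
  induction l with
  | nil =>
    intro d r h1 h2
    exact ⟨h1, h2, by simp, fun w _ => rfl, fun v _ x => by simp⟩
  | cons v t ih =>
    intro d r h1 h2
    simp only [List.foldl_cons]
    by_cases hc : 0 ≤ v ∧ v < (adj.length : Int)
    · rw [if_pos hc]
      obtain ⟨hv0, hvn⟩ := hc
      have hvtn : v.toNat < adj.length := by omega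
      have hcast : ((v.toNat : Int)) = v := Int.toNat_of_nonneg hv0
      obtain ⟨q1, q2, q3, q4, q5⟩ :=
        ih (d.set u (d.getD u 0 + 1)) (r.set v.toNat (r.getD v.toNat [] ++ [u]))
          (by simp [h1]) (by simp [h2])
      refine ⟨q1, q2, ?_, ?_, ?_⟩
      · rw [q3, pv_getD_set, if_pos ⟨rfl, by omega⟩,
          List.countP_cons_of_pos (by simp; omega)]
        push_cast
        ring
      · intro w hw
        rw [q4 w hw, pv_getD_set, if_neg (by simp [hw])]
      · intro w hw x
        rw [q5 w hw x, pv_getD_set, List.count_cons]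
        by_cases hvv : w = v.toNat
        · subst hvv
          rw [if_pos ⟨rfl, by omega⟩, List.count_append]
          have hvc : (v == ((v.toNat : Int))) = true := by simp; omega
          rw [hvc]
          by_cases hxu : x = u
          · subst hxu
            simp [hcast]
            try omega
          · have h1' : (u == x) = false := by simp [Ne.symm hxu]
            simp [hxu, h1', List.count_cons]
        · rw [if_neg (by simp [hvv])]
          have hvc : (v == ((w : Int))) = false := by
            simp only [beq_eq_false_iff_ne, ne_eq]
            intro h
            exact hvv (by omega)
          rw [hvc]
          simp
    · rw [if_neg hc]
      obtain ⟨q1, q2, q3, q4, q5⟩ := ih d r h1 h2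
      refine ⟨q1, q2, ?_, q4, ?_⟩
      · rw [q3, List.countP_cons]
        have : decide (0 ≤ v ∧ v < (adj.length : Int)) = false := by simpa using hc
        rw [this]
        simp
      · intro v' hv' x
        rw [q5 v' hv' x, List.count_cons]
        have hvc : (v == ((v' : Int))) = false := by
          simp only [beq_eq_false_iff_ne, ne_eq]
          intro h
          exact hc (by constructor <;> omega)
        rw [hvc]
        simp

lemma pv_build_partial (adj : List (List Int)) :
    ∀ (k : Nat), k ≤ adj.length →
      (let st := (List.range k).foldl
          (fun st u =>
            (adj.getD u []).foldl
              (fun (st : List Int × List (List Nat)) v =>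
                if 0 ≤ v ∧ v < (adj.length : Int) then
                  (st.1.set u (st.1.getD u 0 + 1), st.2.set v.toNat (st.2.getD v.toNat [] ++ [u]))
                else st)
              st)
          (List.replicate adj.length 0, List.replicate adj.length []);
       st.1.length = adj.length ∧ st.2.length = adj.length ∧
       (∀ u : Nat, u < adj.length → st.1.getD u 0 =
          if u < k then ((adj.getD u []).countP (fun v => decide (0 ≤ v ∧ v < (adj.length : Int))) : Int) else 0) ∧
       (∀ v : Nat, v < adj.length → ∀ x : Nat, (st.2.getD v []).count x =
          if x < k then (adj.getD x []).count ((v : Int)) else 0)) := by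
  intro k
  induction k with
  | zero =>
    intro _
    refine ⟨by simp, by simp, ?_, ?_⟩
    · intro u hu
      simp [List.getD_replicate _ hu]
    · intro v hv x
      simp [List.getD_replicate _ hv]
  | succ k ih =>
    intro hk
    have hk' : k ≤ adj.length := by omega
    have hkn : k < adj.length := by omega
    obtain ⟨p1, p2, p3, p4⟩ := ih hk'
    rw [List.range_succ, List.foldl_append]
    simp only [List.foldl_cons, List.foldl_nil]
    obtain ⟨q1, q2, q3, q4, q5⟩ := pv_build_inner adj k hkn (adj.getD k []) _ _ p1 p2
    refine ⟨q1, q2, ?_, ?_⟩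
    · intro u hu
      by_cases huk : u = k
      · subst huk
        rw [q3, p3 u hu]
        split_ifs <;> omega
      · rw [q4 u huk, p3 u hu]
        split_ifs <;> omega
    · intro v hv x
      rw [q5 v hv x, p4 v hv x]
      by_cases hxk : x = k
      · subst hxk
        rw [if_pos rfl]
        split_ifs <;> omega
      · rw [if_neg hxk]
        split_ifs <;> omega

lemma pv_build_spec (adj : List (List Int)) :
    (pvB_build adj).1.length = adj.length ∧ (pvB_build adj).2.length = adj.length ∧
    (∀ u : Nat, u < adj.length → (pvB_build adj).1.getD u 0 =
        ((adj.getD u []).countP (fun v => decide (0 ≤ v ∧ v < (adj.length : Int))) : Int)) ∧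
    (∀ v : Nat, v < adj.length → ∀ x : Nat, x < adj.length →
        ((pvB_build adj).2.getD v []).count x = (adj.getD x []).count ((v : Int))) := by
  obtain ⟨p1, p2, p3, p4⟩ := pv_build_partial adj adj.length (le_refl _)
  refine ⟨p1, p2, ?_, ?_⟩
  · intro u hu
    have := p3 u hu
    rwa [if_pos hu] at this
  · intro v hv x hx
    have := p4 v hv x
    rwa [if_pos hx] at this

-- ---------- the invariant ----------

def pvInv (adj : List (List Int)) (aliveA : PySem.Set Int) (aliveB : List Bool)
    (deg : List Int) (remaining : Int) : Prop :=
  aliveB.length = adj.length ∧ deg.length = adj.length ∧ aliveA.Nodup ∧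
  (∀ x ∈ aliveA, ∃ u : Nat, u < adj.length ∧ x = (u : Int)) ∧
  (∀ u : Nat, u < adj.length → (aliveB.getD u false = true ↔ (u : Int) ∈ aliveA)) ∧
  (∀ u : Nat, u < adj.length → aliveB.getD u false = true →
      deg.getD u 0 = ((adj.getD u []).countP (fun v => aliveA.contains v) : Int)) ∧
  remaining = ((List.range adj.length).countP (fun u => aliveB.getD u false) : Int)

lemma pv_contains_diff (s t : PySem.Set Int) (v : Int) :
    PySem.Set.contains (PySem.Set.diff s t) v = (PySem.Set.contains s v && !(decide (v ∈ t))) := by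
  have hiff : (PySem.Set.contains (PySem.Set.diff s t) v = true) ↔ (v ∈ s ∧ v ∉ t) :=
    (PySem.Set.contains_iff _ _).trans (PySem.Set.mem_diff s t v)
  have h2 : (PySem.Set.contains s v = true) ↔ v ∈ s := PySem.Set.contains_iff _ _
  cases hc : PySem.Set.contains s v <;> cases hm : decide (v ∈ t) <;> simp_all

lemma pv_sel_eq (adj : List (List Int)) (aliveA : PySem.Set Int) (aliveB : List Bool) (deg : List Int)
    (hnd : aliveA.Nodup)
    (hrng : ∀ x ∈ aliveA, ∃ u : Nat, u < adj.length ∧ x = (u : Int))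
    (hmem : ∀ u : Nat, u < adj.length → (aliveB.getD u false = true ↔ (u : Int) ∈ aliveA))
    (hdeg : ∀ u : Nat, u < adj.length → aliveB.getD u false = true →
        deg.getD u 0 = ((adj.getD u []).countP (fun v => aliveA.contains v) : Int))
    (hne : aliveA ≠ []) :
    ∃ b : Nat, b < adj.length ∧ aliveB.getD b false = true ∧
      ((PySem.List.sorted aliveA (fun x => x) false).foldl (pvA_step adj aliveA) (none, none)).1
        = some ((b : Int)) ∧
      pvB_sel aliveB deg adj.length = some b := by
  rw [pv_sorted_alive adj aliveA aliveB hnd hrng hmem]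
  have hrel := pv_sel_rel adj aliveA aliveB deg hdeg (List.range adj.length)
    (fun u hu => List.mem_range.mp hu) (none, none) none (Or.inl ⟨rfl, rfl⟩)
  have hex : ∃ u ∈ List.range adj.length, aliveB.getD u false = true := by
    obtain ⟨x, hx⟩ := List.exists_mem_of_ne_nil aliveA hne
    obtain ⟨u, hun, rfl⟩ := hrng x hx
    exact ⟨u, List.mem_range.mpr hun, (hmem u hun).mpr hx⟩
  rcases hrel with ⟨hA, hB⟩ | ⟨b, hB, hbn, hba, hA⟩
  · exact absurd hB (pv_selB_ne_none aliveB deg (List.range adj.length) hex)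
  · refine ⟨b, hbn, hba, ?_, ?_⟩
    · rw [hA]
    · show List.foldl _ none (List.range adj.length) = some b
      exact hB

lemma pv_step_inv (adj : List (List Int)) (aliveA : PySem.Set Int) (aliveB : List Bool)
    (deg : List Int) (remaining : Int)
    (hInv : pvInv adj aliveA aliveB deg remaining)
    (b : Nat) (hbn : b < adj.length) (hba : aliveB.getD b false = true) :
    pvInv adj
      (PySem.Set.diff aliveA
        ((PySem.List.pyGetD adj ((b : Int)) []).foldl
          (fun s v => if PySem.Set.contains aliveA v then PySem.Set.add s v else s)
          (PySem.Set.ofList [((b : Int))])))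
      (pvB_remove adj aliveB b).1
      (pvB_dec (pvB_build adj).2 (pvB_remove adj aliveB b).1 (pvB_remove adj aliveB b).2 deg)
      (remaining - ((pvB_remove adj aliveB b).2.length : Int)) := by
  obtain ⟨hlenB, hlenD, hnd, hrng, hmem, hdeg, hrem⟩ := hInv
  have hpy : PySem.List.pyGetD adj ((b : Int)) [] = adj.getD b [] := PySem.List.pyGetD_natCast adj b []
  -- characterize the B-side removal
  have hinit : ∀ x : Nat, x < adj.length →
      (aliveB.set b false).getD x false = (aliveB.getD x false && !(decide (x ∈ ([b] : List Nat)))) := by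
    intro x hx
    rw [pv_getD_set]
    by_cases hxb : x = b
    · subst hxb
      rw [if_pos ⟨rfl, by omega⟩]
      simp
    · rw [if_neg (by simp [hxb])]
      simp [hxb]
  obtain ⟨q1, q2, q3, q4, q5⟩ := pv_remove_fold adj aliveB (adj.getD b [])
    (aliveB.set b false) [b] (by simp [hlenB]) (List.nodup_singleton b)
    (by intro x hx; simp only [List.mem_cons, List.not_mem_nil, or_false] at hx; omega) hinit
  -- pvB_remove is exactly that fold
  have hqeq : pvB_remove adj aliveB b = (adj.getD b []).foldl
      (fun (st : List Bool × List Nat) v =>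
        if 0 ≤ v ∧ v < (adj.length : Int) ∧ st.1.getD v.toNat false = true then
          (st.1.set v.toNat false, st.2 ++ [v.toNat])
        else st) (aliveB.set b false, [b]) := rfl
  rw [← hqeq] at q1 q2 q3 q4 q5
  -- simplify the removed-list characterization
  have hq4 : ∀ x : Nat, x ∈ (pvB_remove adj aliveB b).2 ↔
      (x = b ∨ ((x : Int) ∈ adj.getD b [] ∧ x < adj.length ∧ aliveB.getD x false = true)) := by
    intro x
    rw [q4 x]
    simp only [List.mem_cons, List.not_mem_nil, or_false]
  -- to_remove membership
  have hTR : ∀ y : Int, y ∈ ((PySem.List.pyGetD adj ((b : Int)) []).foldl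
      (fun s v => if PySem.Set.contains aliveA v then PySem.Set.add s v else s)
      (PySem.Set.ofList [((b : Int))])) ↔
      (y = ((b : Int)) ∨ (y ∈ adj.getD b [] ∧ PySem.Set.contains aliveA y = true)) := by
    intro y
    rw [hpy, pv_mem_foldl_add_if]
    constructor
    · rintro (h | h)
      · left
        have := (PySem.Set.mem_ofList [((b : Int))] y).mp h
        simpa using this
      · exact Or.inr h
    · rintro (rfl | h)
      · exact Or.inl ((PySem.Set.mem_ofList _ _).mpr (by simp))
      · exact Or.inr h
  -- bridge between the two removal descriptions
  have hBR : ∀ y : Int, y ∈ ((PySem.List.pyGetD adj ((b : Int)) []).foldl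
      (fun s v => if PySem.Set.contains aliveA v then PySem.Set.add s v else s)
      (PySem.Set.ofList [((b : Int))])) ↔ ∃ x ∈ (pvB_remove adj aliveB b).2, y = ((x : Int)) := by
    intro y
    rw [hTR]
    constructor
    · rintro (rfl | ⟨hy1, hy2⟩)
      · exact ⟨b, (hq4 b).mpr (Or.inl rfl), rfl⟩
      · have hyA : y ∈ aliveA := (PySem.Set.contains_iff _ _).mp hy2
        obtain ⟨u, hun, rfl⟩ := hrng y hyA
        exact ⟨u, (hq4 u).mpr (Or.inr ⟨hy1, hun, (hmem u hun).mpr hyA⟩), rfl⟩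
    · rintro ⟨x, hx, rfl⟩
      rcases (hq4 x).mp hx with rfl | ⟨hx1, hx2, hx3⟩
      · exact Or.inl rfl
      · exact Or.inr ⟨hx1, (PySem.Set.contains_iff _ _).mpr ((hmem x hx2).mp hx3)⟩
  -- every removed vertex is alive on the A side
  have hsub : ∀ y : Int, y ∈ ((PySem.List.pyGetD adj ((b : Int)) []).foldl
      (fun s v => if PySem.Set.contains aliveA v then PySem.Set.add s v else s)
      (PySem.Set.ofList [((b : Int))])) → y ∈ aliveA := by
    intro y hy
    rcases (hTR y).mp hy with rfl | ⟨_, hy2⟩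
    · exact (hmem b hbn).mp hba
    · exact (PySem.Set.contains_iff _ _).mp hy2
  -- every removed vertex was alive on the B side
  have halv : ∀ x ∈ (pvB_remove adj aliveB b).2, aliveB.getD x false = true := by
    intro x hx
    rcases (hq4 x).mp hx with rfl | ⟨_, _, h⟩
    · exact hba
    · exact h
  obtain ⟨hb1, hb2, hb3, hb4⟩ := pv_build_spec adj
  refine ⟨q1, by rw [pv_dec_len]; exact hlenD, PySem.Set.nodup_diff _ _ hnd, ?_, ?_, ?_, ?_⟩
  · intro x hx
    exact hrng x ((PySem.Set.mem_diff _ _ _).mp hx).1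
  · intro u hu
    rw [q5 u hu, PySem.Set.mem_diff]
    have hcast : ((u : Int)) ∈ (pvB_remove adj aliveB b).2.map (fun (x : Nat) => ((x : Int))) ↔
        u ∈ (pvB_remove adj aliveB b).2 := by
      simp only [List.mem_map]
      constructor
      · rintro ⟨x, hx, hxx⟩
        have : x = u := by omega
        exact this ▸ hx
      · intro h; exact ⟨u, h, rfl⟩
    constructor
    · intro h
      have h1 : aliveB.getD u false = true ∧ u ∉ (pvB_remove adj aliveB b).2 := by
        simpa using h
      refine ⟨(hmem u hu).mp h1.1, fun hmem2 => ?_⟩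
      obtain ⟨x, hx, hxx⟩ := (hBR _).mp hmem2
      have : x = u := by omega
      exact h1.2 (this ▸ hx)
    · rintro ⟨h1, h2⟩
      have hu1 : aliveB.getD u false = true := (hmem u hu).mpr h1
      have hu2 : u ∉ (pvB_remove adj aliveB b).2 := by
        intro hmem2
        exact h2 ((hBR _).mpr ⟨u, hmem2, rfl⟩)
      rw [hu1]
      simp [hu2]
  · -- degree invariant
    intro u hu halive'
    have hsp : aliveB.getD u false = true ∧ u ∉ (pvB_remove adj aliveB b).2 := by
      have := q5 u hu
      rw [halive'] at this
      simpa using this.symm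
    rw [pv_dec_getD (pvB_build adj).2 (pvB_remove adj aliveB b).1 u halive' _ _ (by omega)]
    have hmapc : (pvB_remove adj aliveB b).2.map
          (fun (w : Nat) => ((((pvB_build adj).2.getD w []).count u) : Int))
        = (pvB_remove adj aliveB b).2.map (fun (w : Nat) => (((adj.getD u []).count ((w : Int))) : Int)) := by
      apply List.map_congr_left
      intro w hw
      rw [hb4 w (q3 w hw) u hu]
    rw [hmapc, pv_sum_count (adj.getD u []) _ q2]
    rw [hdeg u hu hsp.1]
    -- the new A-side degree
    have hpt : (adj.getD u []).countP
        (fun v => (PySem.Set.diff aliveA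
          ((PySem.List.pyGetD adj ((b : Int)) []).foldl
            (fun s v => if PySem.Set.contains aliveA v then PySem.Set.add s v else s)
            (PySem.Set.ofList [((b : Int))]))).contains v)
        = (adj.getD u []).countP (fun v => aliveA.contains v &&
            !(decide (v ∈ ((PySem.List.pyGetD adj ((b : Int)) []).foldl
              (fun s v => if PySem.Set.contains aliveA v then PySem.Set.add s v else s)
              (PySem.Set.ofList [((b : Int))]))))) := by
      apply List.countP_congr
      intro v _
      rw [pv_contains_diff]
    rw [hpt]
    have hadd := pv_countP_add (adj.getD u []) (fun v => aliveA.contains v)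
      (fun v => decide (v ∈ ((PySem.List.pyGetD adj ((b : Int)) []).foldl
        (fun s v => if PySem.Set.contains aliveA v then PySem.Set.add s v else s)
        (PySem.Set.ofList [((b : Int))]))))
      (by
        intro x _ hx
        have : x ∈ _ := of_decide_eq_true hx
        exact (PySem.Set.contains_iff _ _).mpr (hsub x this))
    have hcong : (adj.getD u []).countP
        (fun v => decide (v ∈ ((PySem.List.pyGetD adj ((b : Int)) []).foldl
          (fun s v => if PySem.Set.contains aliveA v then PySem.Set.add s v else s)
          (PySem.Set.ofList [((b : Int))]))))
        = (adj.getD u []).countP (fun v => decide (∃ w ∈ (pvB_remove adj aliveB b).2, v = ((w : Int)))) := by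
      apply List.countP_congr
      intro v _
      simp only [decide_eq_true_eq]
      exact hBR v
    rw [hcong] at hadd
    have hadd2 : (adj.getD u []).countP (fun v => aliveA.contains v &&
          !(decide (v ∈ ((PySem.List.pyGetD adj ((b : Int)) []).foldl
            (fun s v => if PySem.Set.contains aliveA v then PySem.Set.add s v else s)
            (PySem.Set.ofList [((b : Int))])))))
        + (adj.getD u []).countP (fun v => decide (∃ w ∈ (pvB_remove adj aliveB b).2, v = ((w : Int))))
        = (adj.getD u []).countP (fun v => aliveA.contains v) := hadd
    omega
  · -- remaining
    have hcnt : (List.range adj.length).countP (fun u => (pvB_remove adj aliveB b).1.getD u false)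
        = (List.range adj.length).countP
            (fun u => aliveB.getD u false && !(decide (u ∈ (pvB_remove adj aliveB b).2))) := by
      apply List.countP_congr
      intro u hu
      rw [q5 u (List.mem_range.mp hu)]
    have hadd := pv_countP_add (List.range adj.length) (fun u => aliveB.getD u false)
      (fun u => decide (u ∈ (pvB_remove adj aliveB b).2))
      (by
        intro x _ hx
        exact halv x (of_decide_eq_true hx))
    have hlen := pv_count_nodup_range (pvB_remove adj aliveB b).2 adj.length q2 q3
    have hadd2 : (List.range adj.length).countP
          (fun u => aliveB.getD u false && !(decide (u ∈ (pvB_remove adj aliveB b).2)))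
        + (List.range adj.length).countP (fun u => decide (u ∈ (pvB_remove adj aliveB b).2))
        = (List.range adj.length).countP (fun u => aliveB.getD u false) := hadd
    rw [hcnt]
    omega


lemma pv_empty_iff (adj : List (List Int)) (aliveA : PySem.Set Int) (aliveB : List Bool)
    (remaining : Int)
    (hrng : ∀ x ∈ aliveA, ∃ u : Nat, u < adj.length ∧ x = (u : Int))
    (hmem : ∀ u : Nat, u < adj.length → (aliveB.getD u false = true ↔ (u : Int) ∈ aliveA))
    (hrem : remaining = ((List.range adj.length).countP (fun u => aliveB.getD u false) : Int)) :
    (aliveA = [] ↔ remaining = 0) := by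
  constructor
  · intro h
    subst h
    have : (List.range adj.length).countP (fun u => aliveB.getD u false) = 0 := by
      rw [List.countP_eq_zero]
      intro u hu
      intro hc
      have := (hmem u (List.mem_range.mp hu)).mp hc
      simp at this
    omega
  · intro h
    rw [List.eq_nil_iff_forall_not_mem]
    intro x hx
    obtain ⟨u, hun, rfl⟩ := hrng x hx
    have halive : aliveB.getD u false = true := (hmem u hun).mpr hx
    have : (List.range adj.length).countP (fun u => aliveB.getD u false) ≠ 0 := by
      intro hc
      rw [List.countP_eq_zero] at hc
      exact hc u (List.mem_range.mpr hun) halive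
    omega

lemma pv_loop_eq (adj : List (List Int)) :
    ∀ (fuel : Nat) (aliveA : PySem.Set Int) (aliveB : List Bool) (deg : List Int)
      (ins : List Bool) (remaining : Int),
      pvInv adj aliveA aliveB deg remaining →
      pvA_loop adj fuel aliveA ins
        = pvB_loop adj (pvB_build adj).2 fuel aliveB deg ins remaining := by
  intro fuel
  induction fuel with
  | zero => intro aliveA aliveB deg ins remaining _; rfl
  | succ fuel ih =>
    intro aliveA aliveB deg ins remaining hInv
    obtain ⟨hlenB, hlenD, hnd, hrng, hmem, hdeg, hrem⟩ := hInv
    have hempty := pv_empty_iff adj aliveA aliveB remaining hrng hmem hrem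
    rw [pvA_loop, pvB_loop]
    by_cases hA0 : aliveA = []
    · rw [if_pos hA0, if_pos (hempty.mp hA0)]
    · have hr0 : ¬(remaining = 0) := fun h => hA0 (hempty.mpr h)
      rw [if_neg hA0, if_neg hr0]
      obtain ⟨b, hbn, hba, hselA, hselB⟩ :=
        pv_sel_eq adj aliveA aliveB deg hnd hrng hmem hdeg hA0
      rw [hselA, hselB]
      simp only [PySem.List.pySetD_natCast]
      exact ih _ _ _ _ _
        (pv_step_inv adj aliveA aliveB deg remaining
          ⟨hlenB, hlenD, hnd, hrng, hmem, hdeg, hrem⟩ b hbn hba)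

-- ===== VERDICT (by name: the statement is the Claim_ definition above) =====
theorem greedy_mis_min_degree_naive_spec : Claim_equal_greedy_mis_min_degree_naive := by
  intro adj _
  show greedy_mis_min_degree_naive adj = greedy_mis_min_degree_naive_alt adj
  obtain ⟨hb1, hb2, hb3, hb4⟩ := pv_build_spec adj
  show pvA_loop adj (adj.length + 1)
      (PySem.Set.ofList (PySem.List.pyRange 0 (adj.length : Int) 1))
      (List.replicate adj.length false)
    = pvB_loop adj (pvB_build adj).2 (adj.length + 1)
      (List.replicate adj.length true) (pvB_build adj).1
      (List.replicate adj.length false) (adj.length : Int)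
  apply pv_loop_eq
  have hmem0 : ∀ x : Int, x ∈ PySem.Set.ofList (PySem.List.pyRange 0 (adj.length : Int) 1)
      ↔ (0 ≤ x ∧ x < (adj.length : Int)) := by
    intro x
    rw [PySem.Set.mem_ofList, PySem.List.mem_pyRange_one]
  refine ⟨by simp, hb1, PySem.Set.nodup_ofList _, ?_, ?_, ?_, ?_⟩
  · intro x hx
    have := (hmem0 x).mp hx
    exact ⟨x.toNat, by omega, by omega⟩
  · intro u hu
    rw [List.getD_replicate _ hu, hmem0]
    constructor
    · intro _; constructor <;> omega
    · intro _; rfl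
  · intro u hu _
    rw [hb3 u hu]
    congr 1
    apply List.countP_congr
    intro v _
    simp only [decide_eq_true_eq, PySem.Set.contains_iff]
    exact (hmem0 v).symm
  · have hc : (List.range adj.length).countP (fun u => (List.replicate adj.length true).getD u false)
        = (List.range adj.length).countP (fun _ => true) := by
      apply List.countP_congr
      intro u hu
      rw [List.getD_replicate _ (List.mem_range.mp hu)]
    rw [hc, List.countP_true, List.length_range]
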